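-- pv_equiv track=rewrite | github.com/Tomas-Wardoloff/4EnLinea | CuatroEnLinea.py | completarTableroEnOrden
-- ===== SOURCE A (Python) =====
-- def soltarFichaEnColumna(ficha, column, tablero):
-- 		for row in range(6, 0, -1):
-- 				if tablero[row - 1][column] == 0:
-- 						tablero[row -1][column] = ficha
-- 						return
--
-- def completarTableroEnOrden(secuencia, tablero):
-- 	c = 0
-- 	for column in secuencia:
-- 		if c % 2 != 0:
-- 			soltarFichaEnColumna(2, column, tablero)
-- 		else:
-- 			soltarFichaEnColumna(1, column, tablero)
-- 		c += 1
-- 	return tablero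
-- ===== SOURCE B (Python) =====
-- def completarTableroEnOrden(secuencia, tablero):
--     # Two-phase: bucket each move's piece by column, then fill each column's
--     # empty cells bottom-up in one pass. Mutates tablero like the original.
--     pieces = [[] for _ in range(7)]
--     for i, column in enumerate(secuencia):
--         pieces[column].append(1 if i % 2 == 0 else 2)
--     for column in range(7):
--         ps = pieces[column]
--         k = 0
--         for row in range(5, -1, -1):
--             if k == len(ps):
--                 break
--             if tablero[row][column] == 0:
--                 tablero[row][column] = ps[k]
--                 k += 1
--     return tablero
-- ===== Notes on version B (the rewrite author's own statement) =====
-- stated objective: alternative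
-- what changed: Replaces the per-move interleaved bottom-up scans with a two-phase group-by-column algorithm: first bucket each move's piece (parity of its index) by column, then fill every column's empty cells bottom-up in a single pass per column.
import Mathlib
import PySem

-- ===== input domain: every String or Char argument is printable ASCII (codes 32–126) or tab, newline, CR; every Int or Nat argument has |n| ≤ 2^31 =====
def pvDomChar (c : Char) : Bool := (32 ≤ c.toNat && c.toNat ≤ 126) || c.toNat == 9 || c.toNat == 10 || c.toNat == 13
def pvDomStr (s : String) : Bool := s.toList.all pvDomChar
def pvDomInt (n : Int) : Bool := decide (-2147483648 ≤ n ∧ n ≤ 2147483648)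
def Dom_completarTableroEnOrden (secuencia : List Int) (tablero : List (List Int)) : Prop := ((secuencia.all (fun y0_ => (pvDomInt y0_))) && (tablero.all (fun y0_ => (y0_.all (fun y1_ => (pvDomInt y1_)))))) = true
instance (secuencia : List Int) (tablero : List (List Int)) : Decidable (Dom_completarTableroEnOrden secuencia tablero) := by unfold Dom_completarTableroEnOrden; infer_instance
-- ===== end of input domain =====

-- B replaces A's per-move interleaved bottom-up scans by a two-phase group-by-column fill
-- (objective: alternative decomposition, same cost). Both Pythons mutate `tablero` in place;
-- the equivalence proved here is about the RETURN value (which aliases that same board).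

-- ===== PORT A =====

-- tablero[r][c] read; exact wherever Python returns (negative wrap included); the
-- default 0/[] is only produced where Python would raise (excluded by Pre_).
def pvCell (tablero : List (List Int)) (r c : Int) : Int :=
  PySem.List.pyGetD (PySem.List.pyGetD tablero r []) c 0

-- tablero[r][c] = v ; exact wherever Python returns (pySetD is a no-op out of range,
-- where Python would raise — excluded by Pre_).
def pvSet (tablero : List (List Int)) (r c v : Int) : List (List Int) :=
  PySem.List.pySetD tablero r (PySem.List.pySetD (PySem.List.pyGetD tablero r []) c v)

-- the `for row in range(6, 0, -1)` loop of soltarFichaEnColumna (early return on first 0)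
def soltarLoop (ficha col : Int) (tablero : List (List Int)) : List Int → List (List Int)
  | [] => tablero
  | row :: rest =>
    if pvCell tablero (row - 1) col == 0 then pvSet tablero (row - 1) col ficha
    else soltarLoop ficha col tablero rest

def soltarFichaEnColumna (ficha col : Int) (tablero : List (List Int)) : List (List Int) :=
  soltarLoop ficha col tablero (PySem.List.pyRange 6 0 (-1))

def completarTableroEnOrden (secuencia : List Int) (tablero : List (List Int)) : List (List Int) :=
  (secuencia.foldl
    (fun (st : List (List Int) × Int) column =>
      (if PySem.Int.mod st.2 2 ≠ 0 then soltarFichaEnColumna 2 column st.1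
       else soltarFichaEnColumna 1 column st.1,
       st.2 + 1))
    (tablero, (0 : Int))).1

-- ===== PORT B =====

-- phase 1: pieces = [[] for _ in range(7)]; pieces[column].append(1 if i % 2 == 0 else 2)
def pvBuckets (secuencia : List Int) : List (List Int) :=
  (PySem.List.enumerate secuencia 0).foldl
    (fun acc p =>
      PySem.List.pySetD acc p.2
        (PySem.List.pyGetD acc p.2 [] ++ [if PySem.Int.mod p.1 2 == 0 then (1 : Int) else 2]))
    (List.replicate 7 [])

-- phase 2 inner loop: `for row in range(5, -1, -1)` placing the buffered pieces in order
-- (the Python `k` pointer into ps is rendered as consuming the suffix of ps).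
def fillLoop (col : Int) (ps rows : List Int) (tablero : List (List Int)) : List (List Int) :=
  match rows, ps with
  | [], _ => tablero
  | _ :: _, [] => tablero   -- break: buffer exhausted
  | row :: rest, p :: ptl =>
    if pvCell tablero row col == 0 then fillLoop col ptl rest (pvSet tablero row col p)
    else fillLoop col (p :: ptl) rest tablero

def completarTableroEnOrden_alt (secuencia : List Int) (tablero : List (List Int)) : List (List Int) :=
  (PySem.List.pyRange 0 7 1).foldl
    (fun b column =>
      fillLoop column (PySem.List.pyGetD (pvBuckets secuencia) column [])
        (PySem.List.pyRange 5 (-1) (-1)) b)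
    tablero

-- ===== PRECONDITION & SPEC =====
-- Pre_ restricts to the natural Connect-Four domain: at least six rows, and every requested
-- column is a standard column index 0..6 present in each of the first six rows. A also
-- returns on some excluded inputs (negative or ≥ 7 column indices via wraparound / wider
-- rows, and rows lacking the cell that an earlier zero keeps unreached) — accidents of
-- Python indexing, see the cited examples.
def Pre_completarTableroEnOrden (secuencia : List Int) (tablero : List (List Int)) : Prop :=
  ∀ c ∈ secuencia,
    0 ≤ c ∧ c < 7 ∧ 6 ≤ tablero.length ∧
      ∀ r ∈ List.range 6, c < ((tablero.getD r []).length : Int)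

instance (secuencia : List Int) (tablero : List (List Int)) :
    Decidable (Pre_completarTableroEnOrden secuencia tablero) := by
  unfold Pre_completarTableroEnOrden; infer_instance

def pvWitness_completarTableroEnOrden : List Int × List (List Int) :=
  ([0, 3, 0, 6],
   [[0, 0, 0, 0, 0, 0, 0], [0, 0, 0, 0, 0, 0, 0], [0, 0, 0, 0, 0, 0, 0],
    [0, 0, 0, 0, 0, 0, 0], [0, 0, 0, 0, 0, 0, 0], [0, 0, 0, 0, 0, 0, 0]])

def Spec_completarTableroEnOrden (secuencia : List Int) (tablero : List (List Int)) (out : List (List Int)) : Prop := out = completarTableroEnOrden_alt secuencia tablero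
instance (secuencia : List Int) (tablero : List (List Int)) (out : List (List Int)) : Decidable (Spec_completarTableroEnOrden secuencia tablero out) := by unfold Spec_completarTableroEnOrden; infer_instance

-- ===== CLAIM (what is proved, stated in full; the proofs are below) =====
def Claim_equal_completarTableroEnOrden : Prop := ∀ (secuencia : List Int) (tablero : List (List Int)), Dom_completarTableroEnOrden secuencia tablero → Pre_completarTableroEnOrden secuencia tablero → Spec_completarTableroEnOrden secuencia tablero (completarTableroEnOrden secuencia tablero)

-- ===== LEMMAS AND PROOFS =====

-- the row list [5,4,3,2,1,0] both fill phases traverse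
def pvROWS : List Int := PySem.List.pyRange 5 (-1) (-1)

-- validity of reading/writing column c at each row of `rows` on board b
def okRows (b : List (List Int)) (c : Int) (rows : List Int) : Prop :=
  0 ≤ c ∧ ∀ row ∈ rows, 0 ≤ row ∧ row.toNat < b.length ∧ c.toNat < (b.getD row.toNat []).length

-- equal shapes (row count and every row length)
def sameShape (b b' : List (List Int)) : Prop :=
  b.length = b'.length ∧ ∀ j : Nat, (b.getD j []).length = (b'.getD j []).length

-- (piece, column) list of A's walk, counter threaded like A's `c`
def movesFrom (k : Int) : List Int → List (Int × Int)
  | [] => []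
  | c :: rest => (if PySem.Int.mod k 2 ≠ 0 then 2 else 1, c) :: movesFrom (k + 1) rest

-- the pieces dropped into column c, in move order
def piecesFor (c : Int) (moves : List (Int × Int)) : List Int :=
  moves.filterMap (fun m => if m.2 = c then some m.1 else none)

theorem fillLoop_nil (col : Int) (rows : List Int) (b : List (List Int)) :
    fillLoop col [] rows b = b := by
  cases rows <;> rfl

theorem sameShape_refl (b : List (List Int)) : sameShape b b := ⟨rfl, fun _ => rfl⟩

theorem sameShape_trans {a b c : List (List Int)} (h1 : sameShape a b) (h2 : sameShape b c) :
    sameShape a c := ⟨h1.1.trans h2.1, fun j => (h1.2 j).trans (h2.2 j)⟩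

-- bridges to Nat-indexed reads/writes (indices are nonnegative throughout the proof)
theorem pyGetD_nonneg {α : Type} (xs : List α) {i : Int} (d : α) (h : 0 ≤ i) :
    PySem.List.pyGetD xs i d = xs.getD i.toNat d := by
  simp [PySem.List.pyGetD, PySem.List.pyGet?_of_nonneg xs h, List.getD_eq_getElem?_getD]

theorem pvCell_eq (b : List (List Int)) {r c : Int} (hr : 0 ≤ r) (hc : 0 ≤ c) :
    pvCell b r c = (b.getD r.toNat []).getD c.toNat 0 := by
  simp [pvCell, pyGetD_nonneg _ _ hr, pyGetD_nonneg _ _ hc]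

theorem pvSet_eq (b : List (List Int)) {r c : Int} (v : Int) (hr : 0 ≤ r) (hc : 0 ≤ c) :
    pvSet b r c v = b.set r.toNat ((b.getD r.toNat []).set c.toNat v) := by
  simp [pvSet, pyGetD_nonneg _ _ hr,
    PySem.List.pySetD_of_nonneg _ _ hr, PySem.List.pySetD_of_nonneg _ _ hc]

theorem getD_set_of_ne {α : Type} (l : List α) (i j : Nat) (a d : α) (h : i ≠ j) :
    (l.set i a).getD j d = l.getD j d := by
  simp [List.getD_eq_getElem?_getD, List.getElem?_set_ne h]

theorem getD_set_self {α : Type} (l : List α) (i : Nat) (a d : α) (h : i < l.length) :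
    (l.set i a).getD i d = a := by
  rw [List.getD_eq_getElem?_getD, List.getElem?_set_self h, Option.getD_some]

theorem sameShape_pvSet (b : List (List Int)) (r c v : Int) (hr : 0 ≤ r) (hc : 0 ≤ c) :
    sameShape b (pvSet b r c v) := by
  rw [pvSet_eq b v hr hc]
  refine ⟨by simp, fun j => ?_⟩
  by_cases hj : r.toNat = j
  · subst hj
    by_cases hl : r.toNat < b.length
    · simp [List.getD_eq_getElem?_getD, List.getElem?_set_self hl]
    · rw [List.set_eq_of_length_le (by omega)]
  · rw [getD_set_of_ne _ _ _ _ _ hj]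

theorem sameShape_fillLoop (col : Int) (ps rows : List Int) (b : List (List Int))
    (hc : 0 ≤ col) (hrows : ∀ row ∈ rows, 0 ≤ row) :
    sameShape b (fillLoop col ps rows b) := by
  induction rows generalizing ps b with
  | nil => exact sameShape_refl b
  | cons row rest ih =>
    match ps with
    | [] => exact sameShape_refl b
    | p :: ptl =>
      have h0 : 0 ≤ row := hrows row (by simp)
      have hrest : ∀ r ∈ rest, 0 ≤ r := fun r h => hrows r (by simp [h])
      rw [fillLoop]
      split
      · exact sameShape_trans (sameShape_pvSet b row col p h0 hc) (ih _ _ hrest)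
      · exact ih _ _ hrest

theorem okRows_of_sameShape {b b' : List (List Int)} {c : Int} {rows : List Int}
    (h : sameShape b b') (hk : okRows b c rows) : okRows b' c rows := by
  obtain ⟨hc, hk⟩ := hk
  refine ⟨hc, fun row hrow => ?_⟩
  obtain ⟨h1, h2, h3⟩ := hk row hrow
  exact ⟨h1, h.1 ▸ h2, h.2 row.toNat ▸ h3⟩

-- cell read after a set at a different column or a different row
theorem pvCell_pvSet_ne (b : List (List Int)) {r c : Int} (r' c' : Int) (v : Int)
    (hr : 0 ≤ r) (hc : 0 ≤ c) (hr' : 0 ≤ r') (hc' : 0 ≤ c')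
    (hne : r.toNat ≠ r'.toNat ∨ c.toNat ≠ c'.toNat) :
    pvCell (pvSet b r c v) r' c' = pvCell b r' c' := by
  rw [pvSet_eq b v hr hc, pvCell_eq _ hr' hc', pvCell_eq _ hr' hc']
  rcases hne with h | h
  · rw [getD_set_of_ne _ _ _ _ _ h]
  · by_cases hj : r.toNat = r'.toNat
    · rw [← hj]
      by_cases hl : r.toNat < b.length
      · rw [getD_set_self _ _ _ _ hl, getD_set_of_ne _ _ _ _ _ h]
      · rw [List.set_eq_of_length_le (by omega)]
    · rw [getD_set_of_ne _ _ _ _ _ hj]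

-- cell read after a set at the same (in-range) position
theorem pvCell_pvSet_eq (b : List (List Int)) {r c : Int} (v : Int)
    (hr : 0 ≤ r) (hc : 0 ≤ c) (hrl : r.toNat < b.length)
    (hcl : c.toNat < (b.getD r.toNat []).length) :
    pvCell (pvSet b r c v) r c = v := by
  rw [pvSet_eq b v hr hc, pvCell_eq _ hr hc, getD_set_self _ _ _ _ hrl,
    getD_set_self _ _ _ _ hcl]

-- two sets at distinct cells commute
theorem pvSet_pvSet_comm (b : List (List Int)) {r c r' c' : Int} (v v' : Int)
    (hr : 0 ≤ r) (hc : 0 ≤ c) (hr' : 0 ≤ r') (hc' : 0 ≤ c')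
    (hrl : r.toNat < b.length) (hrl' : r'.toNat < b.length)
    (hne : r.toNat ≠ r'.toNat ∨ c.toNat ≠ c'.toNat) :
    pvSet (pvSet b r c v) r' c' v' = pvSet (pvSet b r' c' v') r c v := by
  rw [pvSet_eq b v hr hc, pvSet_eq b v' hr' hc',
    pvSet_eq _ v' hr' hc', pvSet_eq _ v hr hc]
  by_cases hj : r.toNat = r'.toNat
  · replace hne : c.toNat ≠ c'.toNat := by tauto
    rw [← hj]
    rw [getD_set_self _ _ _ _ hrl, getD_set_self _ _ _ _ (hj ▸ hrl')]
    simp only [List.set_set]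
    rw [List.set_comm _ _ hne]
  · rw [getD_set_of_ne _ _ _ _ _ hj, getD_set_of_ne _ _ _ _ _ (Ne.symm hj),
      List.set_comm _ _ hj]

-- locality: fillLoop col only writes cells (row ∈ rows, col)
theorem pvCell_fillLoop_ne (col : Int) (ps rows : List Int) (b : List (List Int))
    (hok : okRows b col rows) (r' c' : Int) (hr' : 0 ≤ r') (hc' : 0 ≤ c')
    (hne : c'.toNat ≠ col.toNat ∨ r' ∉ rows) :
    pvCell (fillLoop col ps rows b) r' c' = pvCell b r' c' := by
  obtain ⟨hc0, hok⟩ := hok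
  induction rows generalizing ps b with
  | nil => cases ps <;> rfl
  | cons row rest ih =>
    match ps with
    | [] => rw [fillLoop_nil]
    | p :: ptl =>
      obtain ⟨hrow0, hrowl, hcoll⟩ := hok row (by simp)
      have hokr : ∀ r ∈ rest, 0 ≤ r ∧ r.toNat < b.length ∧ col.toNat < (b.getD r.toNat []).length :=
        fun r h => hok r (by simp [h])
      have hner : c'.toNat ≠ col.toNat ∨ r' ∉ rest := by
        rcases hne with h | h
        · exact Or.inl h
        · exact Or.inr (fun hmem => h (by simp [hmem]))
      rw [fillLoop]
      split
      · have hsh := sameShape_pvSet b row col p hrow0 hc0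
        rw [ih ptl (pvSet b row col p) hner
            (fun r h => ⟨(hokr r h).1, hsh.1 ▸ (hokr r h).2.1, hsh.2 r.toNat ▸ (hokr r h).2.2⟩)]
        refine pvCell_pvSet_ne b r' c' p hrow0 hc0 hr' hc' ?_
        rcases hne with h | h
        · exact Or.inr (Ne.symm h)
        · exact Or.inl (by have : r' ≠ row := fun he => h (by simp [he]); omega)
      · exact ih (p :: ptl) b hner hokr

-- a set in another column commutes past fillLoop
theorem fillLoop_pvSet_comm (col : Int) (ps rows : List Int) (b : List (List Int))
    {r' c' : Int} (v : Int) (hok : okRows b col rows)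
    (hr' : 0 ≤ r') (hc' : 0 ≤ c') (hrl' : r'.toNat < b.length)
    (hne : c'.toNat ≠ col.toNat) :
    fillLoop col ps rows (pvSet b r' c' v) = pvSet (fillLoop col ps rows b) r' c' v := by
  obtain ⟨hc0, hok⟩ := hok
  induction rows generalizing ps b with
  | nil => cases ps <;> rfl
  | cons row rest ih =>
    match ps with
    | [] => rw [fillLoop_nil, fillLoop_nil]
    | p :: ptl =>
      obtain ⟨hrow0, hrowl, hcoll⟩ := hok row (by simp)
      have hokr : ∀ r ∈ rest, 0 ≤ r ∧ r.toNat < b.length ∧ col.toNat < (b.getD r.toNat []).length :=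
        fun r h => hok r (by simp [h])
      rw [fillLoop, fillLoop,
        pvCell_pvSet_ne b row col v hr' hc' hrow0 hc0 (Or.inr hne)]
      split
      · rw [pvSet_pvSet_comm b v p hr' hc' hrow0 hc0 hrl' hrowl (Or.inr hne)]
        have hsh := sameShape_pvSet b row col p hrow0 hc0
        exact ih ptl (pvSet b row col p) (hsh.1 ▸ hrl')
          (fun r h => ⟨(hokr r h).1, hsh.1 ▸ (hokr r h).2.1, hsh.2 r.toNat ▸ (hokr r h).2.2⟩)
      · exact ih (p :: ptl) b hrl' hokr

-- fills of two distinct columns commute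
theorem fillLoop_comm (c1 c2 : Int) (ps1 ps2 rows1 rows2 : List Int) (b : List (List Int))
    (h1 : okRows b c1 rows1) (h2 : okRows b c2 rows2) (hne : c1.toNat ≠ c2.toNat) :
    fillLoop c1 ps1 rows1 (fillLoop c2 ps2 rows2 b)
      = fillLoop c2 ps2 rows2 (fillLoop c1 ps1 rows1 b) := by
  induction rows1 generalizing ps1 b with
  | nil => cases ps1 <;> rfl
  | cons row rest ih =>
    match ps1 with
    | [] => rw [fillLoop_nil, fillLoop_nil]
    | p :: ptl =>
      obtain ⟨hc10, hok1⟩ := h1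
      obtain ⟨hrow0, hrowl, hcoll⟩ := hok1 row (by simp)
      have h1r : okRows b c1 rest := ⟨hc10, fun r h => hok1 r (by simp [h])⟩
      rw [fillLoop, fillLoop,
        pvCell_fillLoop_ne c2 ps2 rows2 b h2 row c1 hrow0 hc10 (Or.inl hne)]
      split
      · rw [← fillLoop_pvSet_comm c2 ps2 rows2 b p h2 hrow0 hc10 hrowl hne]
        have hsh := sameShape_pvSet b row c1 p hrow0 hc10
        exact ih ptl (pvSet b row c1 p) (okRows_of_sameShape hsh h1r) (okRows_of_sameShape hsh h2)
      · exact ih (p :: ptl) b h1r h2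

-- dropping the head piece first, then filling the rest, is one combined fill
theorem fillLoop_cons (col : Int) (p : Int) (ps rows : List Int) (b : List (List Int))
    (hok : okRows b col rows) (hnd : rows.Nodup) (hp : p ≠ 0) :
    fillLoop col (p :: ps) rows b = fillLoop col ps rows (fillLoop col [p] rows b) := by
  induction rows generalizing b with
  | nil => cases ps <;> rfl
  | cons row rest ih =>
    obtain ⟨hc0, hokm⟩ := hok
    obtain ⟨hrow0, hrowl, hcoll⟩ := hokm row (by simp)
    have hokr : okRows b col rest := ⟨hc0, fun r h => hokm r (by simp [h])⟩
    have hndr : rest.Nodup := (List.nodup_cons.mp hnd).2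
    have hnm : row ∉ rest := (List.nodup_cons.mp hnd).1
    rw [fillLoop, fillLoop]
    split
    · rename_i hz
      rw [fillLoop_nil]
      have hv : (pvCell (pvSet b row col p) row col == 0) = false := by
        rw [pvCell_pvSet_eq b p hrow0 hc0 hrowl hcoll]; simpa using hp
      cases ps with
      | nil => rw [fillLoop_nil, fillLoop_nil]
      | cons q qtl =>
        conv_rhs => rw [fillLoop]
        simp only [hv, Bool.false_eq_true, if_false]
    · rename_i hz
      rw [ih b hokr hndr]
      have hcell : pvCell (fillLoop col [p] rest b) row col = pvCell b row col :=
        pvCell_fillLoop_ne col [p] rest b hokr row col hrow0 hc0 (Or.inr hnm)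
      cases ps with
      | nil => rw [fillLoop_nil, fillLoop_nil]
      | cons q qtl =>
        conv_rhs => rw [fillLoop]
        rw [hcell, if_neg hz]

-- A's inner loop is fillLoop with a single piece
theorem soltarLoop_eq_fillLoop (ficha col : Int) (rows : List Int) (b : List (List Int)) :
    soltarLoop ficha col b (rows.map (· + 1)) = fillLoop col [ficha] rows b := by
  induction rows generalizing b with
  | nil => rfl
  | cons row rest ih =>
    simp only [List.map_cons, soltarLoop, fillLoop, add_sub_cancel_right]
    split
    · rw [fillLoop_nil]
    · exact ih b

theorem soltar_eq_fillLoop (ficha col : Int) (b : List (List Int)) :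
    soltarFichaEnColumna ficha col b = fillLoop col [ficha] pvROWS b := by
  rw [soltarFichaEnColumna, show PySem.List.pyRange 6 0 (-1) = pvROWS.map (· + 1) by decide,
    soltarLoop_eq_fillLoop]

-- A's outer fold with its counter = fold over the move list
theorem foldA_eq_moves (sec : List Int) (k : Int) (b : List (List Int)) :
    (sec.foldl
      (fun (st : List (List Int) × Int) column =>
        (if PySem.Int.mod st.2 2 ≠ 0 then soltarFichaEnColumna 2 column st.1
         else soltarFichaEnColumna 1 column st.1, st.2 + 1)) (b, k)).1
      = (movesFrom k sec).foldl (fun b m => fillLoop m.2 [m.1] pvROWS b) b := by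
  induction sec generalizing k b with
  | nil => rfl
  | cons c rest ih =>
    have hstep : (if PySem.Int.mod k 2 ≠ 0 then soltarFichaEnColumna 2 c b
        else soltarFichaEnColumna 1 c b)
        = fillLoop c [if PySem.Int.mod k 2 ≠ 0 then 2 else 1] pvROWS b := by
      split <;> rw [soltar_eq_fillLoop]
    simp only [List.foldl_cons, movesFrom, hstep]
    exact ih (k + 1) _

theorem piecesFor_cons (c : Int) (m : Int × Int) (ms : List (Int × Int)) :
    piecesFor c (m :: ms)
      = (if m.2 = c then [m.1] else []) ++ piecesFor c ms := by
  simp only [piecesFor, List.filterMap_cons]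
  split <;> simp_all

-- accumulator invariant of B's bucket-building fold
theorem bucketsAux (sec : List Int) (s : Int) (acc : List (List Int)) (c : Int)
    (hacc : acc.length = 7) (hc0 : 0 ≤ c) (hc7 : c < 7)
    (hsec : ∀ x ∈ sec, 0 ≤ x ∧ x < 7) :
    PySem.List.pyGetD
        ((PySem.List.enumerate sec s).foldl
          (fun acc p =>
            PySem.List.pySetD acc p.2
              (PySem.List.pyGetD acc p.2 [] ++ [if PySem.Int.mod p.1 2 == 0 then (1 : Int) else 2]))
          acc) c []
      = PySem.List.pyGetD acc c [] ++ piecesFor c (movesFrom s sec) := by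
  induction sec generalizing s acc with
  | nil => simp [piecesFor, movesFrom, PySem.List.enumerate]
  | cons x rest ih =>
    obtain ⟨hx0, hx7⟩ := hsec x (by simp)
    have hrest : ∀ y ∈ rest, 0 ≤ y ∧ y < 7 := fun y h => hsec y (by simp [h])
    rw [PySem.List.enumerate_cons, List.foldl_cons,
      ih (s + 1) _ (by rw [PySem.List.length_pySetD]; exact hacc) hrest]
    have hgx : PySem.List.pyGetD
        (PySem.List.pySetD acc x (PySem.List.pyGetD acc x [] ++ [if PySem.Int.mod s 2 == 0 then (1 : Int) else 2])) c []
        = if c.toNat = x.toNat then PySem.List.pyGetD acc x [] ++ [if PySem.Int.mod s 2 == 0 then (1 : Int) else 2]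
          else PySem.List.pyGetD acc c [] := by
      rw [show x = ((x.toNat : Nat) : Int) by omega, show c = ((c.toNat : Nat) : Int) by omega,
        PySem.List.pyGetD_pySetD_natCast _ _ _ _ _ (by omega)]
      simp only [Int.toNat_natCast]
      rfl
    rw [hgx, movesFrom, piecesFor_cons]
    have hpiece : (if PySem.Int.mod s 2 ≠ 0 then (2 : Int) else 1)
        = (if PySem.Int.mod s 2 == 0 then (1 : Int) else 2) := by
      by_cases h : PySem.Int.mod s 2 = 0
      · rw [if_neg (fun hh => hh h), if_pos (by simpa using h)]
      · rw [if_pos h, if_neg (by simpa using h)]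
    by_cases hcx : c = x
    · subst hcx
      rw [if_pos rfl, if_pos rfl, ← hpiece, List.append_assoc]
    · have h1 : ¬ (c.toNat = x.toNat) := by omega
      rw [if_neg h1, if_neg (Ne.symm hcx), List.nil_append]

-- bucket characterisation: bucket c of pvBuckets = pieces for column c in move order
theorem buckets_spec (sec : List Int) (c : Int) (hc0 : 0 ≤ c) (hc7 : c < 7)
    (hsec : ∀ x ∈ sec, 0 ≤ x ∧ x < 7) :
    PySem.List.pyGetD (pvBuckets sec) c [] = piecesFor c (movesFrom 0 sec) := by
  rw [pvBuckets, bucketsAux sec 0 (List.replicate 7 []) c (by simp) hc0 hc7 hsec]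
  rw [pyGetD_nonneg _ _ hc0, List.getD_eq_getElem?_getD,
    List.getElem?_replicate_of_lt (by omega), Option.getD_some, List.nil_append]

-- reordering: the move at the head can be played first, then the grouped fills
theorem foldCols_pull (cols : List Int) (f : Int → List Int) (c p : Int)
    (b : List (List Int)) (hmem : c ∈ cols) (hnd : cols.Nodup) (hp : p ≠ 0)
    (hokc : okRows b c pvROWS)
    (hok : ∀ col ∈ cols, f col ≠ [] → okRows b col pvROWS)
    (hlt : ∀ col ∈ cols, 0 ≤ col) :
    cols.foldl (fun b col => fillLoop col (if col = c then p :: f col else f col) pvROWS b) b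
      = cols.foldl (fun b col => fillLoop col (f col) pvROWS b) (fillLoop c [p] pvROWS b) := by
  have hrows0 : ∀ row ∈ pvROWS, 0 ≤ row := by decide
  induction cols generalizing b with
  | nil => exact absurd hmem (by simp)
  | cons c0 rest ih =>
    have hnd0 : c0 ∉ rest := (List.nodup_cons.mp hnd).1
    have hndr : rest.Nodup := (List.nodup_cons.mp hnd).2
    simp only [List.foldl_cons]
    by_cases hc0c : c0 = c
    · subst hc0c
      rw [if_pos rfl, fillLoop_cons c0 p (f c0) pvROWS b hokc (by decide) hp]
      exact PySem.List.foldl_congr_mem rest _ _ _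
        (fun acc x hx => by rw [if_neg (fun he => hnd0 (by rwa [he] at hx))])
    · have hmemr : c ∈ rest := by
        rcases List.mem_cons.mp hmem with h | h
        · exact absurd h.symm hc0c
        · exact h
      rw [if_neg hc0c]
      have hsh := sameShape_fillLoop c0 (f c0) pvROWS b (hlt c0 (by simp)) hrows0
      rw [ih (fillLoop c0 (f c0) pvROWS b) hmemr hndr (okRows_of_sameShape hsh hokc)
        (fun col hcol hfe => okRows_of_sameShape hsh (hok col (by simp [hcol]) hfe))
        (fun col hcol => hlt col (by simp [hcol]))]
      have hcomm : fillLoop c [p] pvROWS (fillLoop c0 (f c0) pvROWS b)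
          = fillLoop c0 (f c0) pvROWS (fillLoop c [p] pvROWS b) := by
        by_cases hfe : f c0 = []
        · rw [hfe, fillLoop_nil, fillLoop_nil]
        · have hne : c.toNat ≠ c0.toNat := by
            have h0 : 0 ≤ c := hokc.1
            have h1 : 0 ≤ c0 := hlt c0 (by simp)
            intro he
            exact hc0c (show c0 = c by omega)
          exact fillLoop_comm c c0 [p] (f c0) pvROWS pvROWS b hokc
            (hok c0 (by simp) hfe) hne
      rw [hcomm]

theorem fold_fill_nil (cols : List Int) (b : List (List Int)) :
    cols.foldl (fun b col => fillLoop col [] pvROWS b) b = b := by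
  induction cols generalizing b with
  | nil => rfl
  | cons c rest ih => rw [List.foldl_cons, fillLoop_nil]; exact ih b

theorem piecesFor_exists {c : Int} {ms : List (Int × Int)} (h : piecesFor c ms ≠ []) :
    ∃ m ∈ ms, m.2 = c := by
  by_contra hno
  refine h (List.filterMap_eq_nil_iff.mpr (fun m hm => ?_))
  have : ¬ m.2 = c := fun he => hno ⟨m, hm, he⟩
  simp [this]

-- main: the interleaved per-move fold equals the grouped per-column fold
theorem grouped_eq_moves (moves : List (Int × Int)) (b : List (List Int))
    (hm : ∀ m ∈ moves, m.1 ≠ 0 ∧ 0 ≤ m.2 ∧ m.2 < 7 ∧ okRows b m.2 pvROWS) :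
    (PySem.List.pyRange 0 7 1).foldl
        (fun b col => fillLoop col (piecesFor col moves) pvROWS b) b
      = moves.foldl (fun b m => fillLoop m.2 [m.1] pvROWS b) b := by
  have hrows0 : ∀ row ∈ pvROWS, 0 ≤ row := by decide
  induction moves generalizing b with
  | nil =>
    simp only [piecesFor, List.filterMap_nil]
    exact fold_fill_nil _ b
  | cons m rest ih =>
    obtain ⟨hm1, hm20, hm27, hmok⟩ := hm m (by simp)
    have hcongr : (PySem.List.pyRange 0 7 1).foldl
        (fun b col => fillLoop col (piecesFor col (m :: rest)) pvROWS b) b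
        = (PySem.List.pyRange 0 7 1).foldl
        (fun b col => fillLoop col
          (if col = m.2 then m.1 :: piecesFor col rest else piecesFor col rest) pvROWS b) b :=
      PySem.List.foldl_congr_mem _ _ _ _ (fun acc col _ => by
        rw [piecesFor_cons]
        by_cases hce : m.2 = col
        · rw [if_pos hce, if_pos hce.symm, List.singleton_append]
        · rw [if_neg hce, if_neg (fun hh => hce hh.symm), List.nil_append])
    rw [hcongr,
      foldCols_pull (PySem.List.pyRange 0 7 1) (fun col => piecesFor col rest) m.2 m.1 b
        (PySem.List.mem_pyRange_one.mpr ⟨hm20, hm27⟩) (PySem.List.nodup_pyRange_one 0 7)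
        hm1 hmok
        (fun col _ hfe => by
          obtain ⟨m', hm', he⟩ := piecesFor_exists hfe
          exact he ▸ (hm m' (by simp [hm'])).2.2.2)
        (fun col hcol => (PySem.List.mem_pyRange_one.mp hcol).1),
      List.foldl_cons]
    have hsh := sameShape_fillLoop m.2 [m.1] pvROWS b hm20 hrows0
    exact ih (fillLoop m.2 [m.1] pvROWS b) (fun m' hm' =>
      ⟨(hm m' (by simp [hm'])).1, (hm m' (by simp [hm'])).2.1, (hm m' (by simp [hm'])).2.2.1,
        okRows_of_sameShape hsh (hm m' (by simp [hm'])).2.2.2⟩)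

-- ===== VERDICT (by name: the statement is the Claim_ definition above) =====
theorem movesFrom_mem {m : Int × Int} {k : Int} {sec : List Int}
    (h : m ∈ movesFrom k sec) : m.1 ≠ 0 ∧ m.2 ∈ sec := by
  induction sec generalizing k with
  | nil => simp [movesFrom] at h
  | cons x rest ih =>
    rw [movesFrom, List.mem_cons] at h
    rcases h with h | h
    · constructor
      · rw [h]; split <;> simp
      · rw [h]; simp
    · exact ⟨(ih h).1, by simp [(ih h).2]⟩

theorem completarTableroEnOrden_spec : Claim_equal_completarTableroEnOrden := by
  intro sec t _ hcols
  show completarTableroEnOrden sec t = completarTableroEnOrden_alt sec t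
  have hA : completarTableroEnOrden sec t
      = (movesFrom 0 sec).foldl (fun b m => fillLoop m.2 [m.1] pvROWS b) t :=
    foldA_eq_moves sec 0 t
  have hB : completarTableroEnOrden_alt sec t
      = (PySem.List.pyRange 0 7 1).foldl
          (fun b col => fillLoop col (piecesFor col (movesFrom 0 sec)) pvROWS b) t :=
    PySem.List.foldl_congr_mem _ _ _ _ (fun acc col hcol => by
      obtain ⟨h0, h7⟩ := PySem.List.mem_pyRange_one.mp hcol
      rw [buckets_spec sec col h0 h7 (fun x hx => ⟨(hcols x hx).1, (hcols x hx).2.1⟩)]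
      rfl)
  have hmoves : ∀ m ∈ movesFrom 0 sec, m.1 ≠ 0 ∧ 0 ≤ m.2 ∧ m.2 < 7 ∧ okRows t m.2 pvROWS := by
    intro m hmem
    obtain ⟨h1, h2⟩ := movesFrom_mem hmem
    obtain ⟨hc0, hc7, hlen, hr⟩ := hcols m.2 h2
    refine ⟨h1, hc0, hc7, hc0, fun row hrow => ?_⟩
    have hrow' : row = 5 ∨ row = 4 ∨ row = 3 ∨ row = 2 ∨ row = 1 ∨ row = 0 := by
      rw [show pvROWS = [5, 4, 3, 2, 1, 0] by decide] at hrow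
      simpa using hrow
    have hget : ∀ r : Nat, r < 6 → m.2.toNat < (t.getD r []).length := by
      intro r hr6
      have := hr r (List.mem_range.mpr hr6)
      omega
    rcases hrow' with h | h | h | h | h | h <;> subst h <;>
      exact ⟨by omega, by omega, hget _ (by omega)⟩
  rw [hA, hB, grouped_eq_moves (movesFrom 0 sec) t hmoves]
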